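-- pv_equiv track=rewrite | github.com/DrayChou/smart-ai-router | core/router/mixins/tag.py | _extract_channel_id
-- ===== SOURCE A (Python) =====
-- from typing import Optional
--
-- def _extract_channel_id(cache_key: str) -> Optional[str]:
--     if not cache_key:
--         return None
--
--     if '_' not in cache_key:
--         return cache_key
--
--     parts = cache_key.split('_')
--     potential_hash = parts[-1]
--     if len(potential_hash) == 8 and all(c in '0123456789abcdef' for c in potential_hash.lower()):
--         return '_'.join(parts[:-1])
--     return cache_key
-- ===== SOURCE B (Python) =====
-- from typing import Optional
--
--
-- def _extract_channel_id(cache_key: str) -> Optional[str]: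
--     if not cache_key:
--         return None
--     # A trailing hash suffix (underscore plus 8 hex chars) occupies exactly the last 9 chars:
--     # inspect them directly instead of splitting and rejoining the whole key.
--     if len(cache_key) >= 9 and cache_key[-9] == '_' and all(
--             c in '0123456789abcdef' for c in cache_key[-8:].lower()):
--         return cache_key[:-9]
--     return cache_key
-- ===== Notes on version B (the rewrite author's own statement) =====
-- stated objective: simpler
-- what changed: B inspects the candidate suffix in place (length check, underscore at index -9, eight hex chars at the end) and slices the prefix off, instead of splitting the whole key on underscores, testing the last part and rejoining the rest.
import Mathlib
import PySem

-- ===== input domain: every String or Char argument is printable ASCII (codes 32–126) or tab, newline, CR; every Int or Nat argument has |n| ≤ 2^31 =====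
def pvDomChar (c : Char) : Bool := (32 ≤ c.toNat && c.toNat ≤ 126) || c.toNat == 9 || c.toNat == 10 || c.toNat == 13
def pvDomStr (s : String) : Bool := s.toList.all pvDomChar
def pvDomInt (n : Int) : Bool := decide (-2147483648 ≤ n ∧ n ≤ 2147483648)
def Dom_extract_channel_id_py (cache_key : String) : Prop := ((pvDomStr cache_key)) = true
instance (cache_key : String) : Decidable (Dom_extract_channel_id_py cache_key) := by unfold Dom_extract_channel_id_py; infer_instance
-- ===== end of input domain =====

-- B checks the candidate nine-char hash suffix in place (length test, underscore at index -9,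
-- hex test on the last 8 chars) instead of splitting the whole key and rejoining; objective: simpler.

-- ===== PORT A =====
def extract_channel_id_py (cache_key : String) : Option String :=
  let cs := cache_key.toList
  if cs.isEmpty then none
  else if !PySem.Chars.isIn ['_'] cs then some cache_key
  else
    let parts := PySem.Chars.splitOn cs ['_']
    -- parts is never empty, so Python's parts[-1] cannot raise; the default [] is unreachable
    let potential_hash := PySem.List.pyGetD parts (-1) []
    if potential_hash.length == 8
        && (PySem.Chars.lower potential_hash).all
            (fun c => PySem.Chars.isIn [c] "0123456789abcdef".toList) then
      some (String.ofList (PySem.Chars.join ['_'] (PySem.List.slice parts none (some (-1)))))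
    else some cache_key

-- ===== PORT B =====
def extract_channel_id_py_alt (cache_key : String) : Option String :=
  let cs := cache_key.toList
  if cs.isEmpty then none
  else if decide (9 ≤ cs.length)
      && (PySem.List.pyGet? cs (-9) == some '_')
      && (PySem.Chars.lower (PySem.List.slice cs (some (-8)) none)).all
          (fun c => PySem.Chars.isIn [c] "0123456789abcdef".toList) then
    some (String.ofList (PySem.List.slice cs none (some (-9))))
  else some cache_key

-- ===== PRECONDITION & SPEC =====
def Spec_extract_channel_id_py (cache_key : String) (out : Option String) : Prop := out = extract_channel_id_py_alt cache_key
instance (cache_key : String) (out : Option String) : Decidable (Spec_extract_channel_id_py cache_key out) := by unfold Spec_extract_channel_id_py; infer_instance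

-- ===== CLAIM (what is proved, stated in full; the proofs are below) =====
def Claim_equal_extract_channel_id_py : Prop := ∀ (cache_key : String), Dom_extract_channel_id_py cache_key → Spec_extract_channel_id_py cache_key (extract_channel_id_py cache_key)

-- ===== LEMMAS AND PROOFS =====

-- clean structural model of PySem.Chars.splitOn for a single-character separator
def mySplit (a : Char) : List Char → List Char → List (List Char)
  | [], cur => [cur.reverse]
  | c :: rest, cur => if c = a then cur.reverse :: mySplit a rest [] else mySplit a rest (c :: cur)

-- the hex test both programs perform on a candidate suffix
def hexAll (u : List Char) : Bool :=
  (PySem.Chars.lower u).all (fun c => PySem.Chars.isIn [c] "0123456789abcdef".toList)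

theorem go_eq_mySplit (a : Char) : ∀ (fuel : Nat) (l cur : List Char) (acc : List (List Char))
    (_ : l.length < fuel),
    PySem.Chars.splitOn.go [a] fuel l cur acc = acc.reverse ++ mySplit a l cur := by
  intro fuel
  induction fuel with
  | zero => intro l cur acc h; omega
  | succ n ih =>
    intro l cur acc h
    cases l with
    | nil => simp [PySem.Chars.splitOn.go, mySplit]
    | cons c rest =>
      by_cases hca : a = c
      · subst hca
        simp only [PySem.Chars.splitOn.go, List.isPrefixOf, BEq.rfl, Bool.true_and, if_pos,
          List.length_cons, List.length_nil, List.drop_succ_cons, List.drop_zero]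
        rw [ih rest [] (cur.reverse :: acc) (by simp at h ⊢; omega)]
        simp [mySplit]
      · simp only [PySem.Chars.splitOn.go, List.isPrefixOf, Bool.and_true]
        rw [if_neg (by simp [beq_iff_eq]; intro h'; exact hca h')]
        rw [ih rest (c :: cur) acc (by simp at h ⊢; omega)]
        have hc : ¬ (c = a) := fun h' => hca h'.symm
        simp [mySplit, hc]

theorem splitOn_single (a : Char) (cs : List Char) :
    PySem.Chars.splitOn cs [a] = mySplit a cs [] := by
  unfold PySem.Chars.splitOn
  rw [go_eq_mySplit a (cs.length + 1) cs [] [] (by omega)]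
  simp

theorem mySplit_ne_nil (a : Char) : ∀ (l cur : List Char), mySplit a l cur ≠ [] := by
  intro l
  induction l with
  | nil => intro cur; simp [mySplit]
  | cons c rest ih =>
    intro cur
    by_cases hc : c = a <;> simp [mySplit, hc, ih]

theorem mySplit_no_sep (a : Char) : ∀ (l cur : List Char), a ∉ l →
    mySplit a l cur = [cur.reverse ++ l] := by
  intro l
  induction l with
  | nil => intro cur _; simp [mySplit]
  | cons c rest ih =>
    intro cur h
    have h' : ¬ (a = c) ∧ a ∉ rest := by simpa [not_or] using h
    have hc : ¬ (c = a) := fun he => h'.1 he.symm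
    simp [mySplit, hc, ih (c :: cur) h'.2]

theorem mySplit_append (a : Char) (t : List Char) (h : a ∉ t) :
    ∀ (P cur : List Char), mySplit a (P ++ a :: t) cur = mySplit a P cur ++ [t] := by
  intro P
  induction P with
  | nil =>
    intro cur
    simp [mySplit, mySplit_no_sep a t [] h]
  | cons c P' ih =>
    intro cur
    by_cases hc : c = a <;> simp [mySplit, hc, ih]

theorem join_mySplit (a : Char) : ∀ (l cur : List Char),
    PySem.Chars.join [a] (mySplit a l cur) = cur.reverse ++ l := by
  intro l
  induction l with
  | nil => intro cur; simp [mySplit, PySem.Chars.join_singleton]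
  | cons c rest ih =>
    intro cur
    by_cases hc : c = a
    · subst hc
      rw [show mySplit c (c :: rest) cur = cur.reverse :: mySplit c rest [] from by simp [mySplit]]
      cases hm : mySplit c rest [] with
      | nil => exact absurd hm (mySplit_ne_nil c rest [])
      | cons q rest' =>
        rw [PySem.Chars.join_cons_cons, ← hm, ih []]
        simp
    · rw [show mySplit a (c :: rest) cur = mySplit a rest (c :: cur) from by simp [mySplit, hc]]
      rw [ih (c :: cur)]
      simp

theorem exists_last_occ {a : Char} {l : List Char} (h : a ∈ l) :
    ∃ P t, l = P ++ a :: t ∧ a ∉ t := by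
  induction l with
  | nil => cases h
  | cons c rest ih =>
    by_cases hr : a ∈ rest
    · obtain ⟨P, t, heq, hnt⟩ := ih hr
      exact ⟨c :: P, t, by simp [heq], hnt⟩
    · rcases List.mem_cons.mp h with hc | hc
      · exact ⟨[], rest, by simp [hc.symm], hr⟩
      · exact absurd hc hr

theorem singleton_infix_iff (a : Char) (l : List Char) : [a] <:+: l ↔ a ∈ l := by
  constructor
  · intro h; exact h.mem (List.mem_singleton_self a)
  · intro h
    obtain ⟨s, t, rfl⟩ := List.append_of_mem h
    exact ⟨s, t, by simp⟩

theorem hexAll_of_mem_underscore (u : List Char) (h : '_' ∈ u) : hexAll u = false := by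
  unfold hexAll
  rw [List.all_eq_false]
  refine ⟨PySem.Chars.lowerChar '_', List.mem_map_of_mem h, by decide⟩

-- B's condition, evaluated on a key decomposed at its LAST underscore, equals A's test on the last part
theorem condB_eq (P t : List Char) (hnt : '_' ∉ t) :
    (decide (9 ≤ (P ++ '_' :: t).length)
      && (PySem.List.pyGet? (P ++ '_' :: t) (-9) == some '_')
      && hexAll (PySem.List.slice (P ++ '_' :: t) (some (-8)) none))
    = ((t.length == 8) && hexAll t) := by
  by_cases h8 : t.length = 8
  · have hlen : (P ++ '_' :: t).length = P.length + 9 := by simp [h8]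
    rw [PySem.List.pyGet?_neg_ofNat _ 9 (by omega) (by omega)]
    rw [PySem.List.slice_from_neg_ofNat _ 8 (by omega)]
    have hidx : (P ++ '_' :: t)[(P ++ '_' :: t).length - 9]? = some '_' := by
      rw [hlen, show P.length + 9 - 9 = P.length from by omega]
      rw [List.getElem?_append_right (by omega)]
      simp
    have hdrop : (P ++ '_' :: t).drop ((P ++ '_' :: t).length - 8) = t := by
      have h1 : (P ++ '_' :: t).length - 8 = P.length + 1 := by
        simp only [List.length_append, List.length_cons, h8]; omega
      rw [h1, show P ++ '_' :: t = (P ++ ['_']) ++ t from by simp,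
        List.drop_left' (by simp)]
    rw [hidx, hdrop]
    simp [h8]
  · have hR : ((t.length == 8) && hexAll t) = false := by simp [h8]
    rw [hR]
    by_cases h9 : 9 ≤ (P ++ '_' :: t).length
    · have hlen : (P ++ '_' :: t).length = P.length + t.length + 1 := by simp; omega
      by_cases hbig : 9 ≤ t.length
      · -- the char at Python index -9 lies inside t, so it cannot be '_'
        rw [PySem.List.pyGet?_neg_ofNat _ 9 (by omega) (by omega)]
        have hidx : (P ++ '_' :: t)[(P ++ '_' :: t).length - 9]? = t[t.length - 9]? := by
          rw [List.getElem?_append_right (by omega)]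
          rw [show (P ++ '_' :: t).length - 9 - P.length = (t.length - 9) + 1 from by omega]
          simp
        obtain ⟨x, hx⟩ : ∃ x, t[t.length - 9]? = some x :=
          ⟨_, List.getElem?_eq_getElem (by omega)⟩
        have hxmem : x ∈ t := List.mem_of_getElem? hx
        rw [hidx, hx]
        have hxne : (some x == some '_') = false := by
          rw [beq_eq_false_iff_ne]
          intro he
          exact hnt (Option.some.inj he ▸ hxmem)
        rw [hxne]
        simp
      · -- t is shorter than 8, so the last 8 chars contain the '_' and fail the hex test
        have ht7 : t.length ≤ 7 := by omega
        have hle : (P ++ '_' :: t).length - 8 ≤ P.length := by omega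
        have hdrop : '_' ∈ (P ++ '_' :: t).drop ((P ++ '_' :: t).length - 8) := by
          rw [List.drop_append]
          refine List.mem_append_right _ ?_
          rw [Nat.sub_eq_zero_of_le hle, List.drop_zero]
          exact List.mem_cons_self ..
        rw [PySem.List.slice_from_neg_ofNat _ 8 (by omega)]
        rw [hexAll_of_mem_underscore _ hdrop]
        simp
    · rw [decide_eq_false h9]
      simp

theorem takeB_eq (P t : List Char) (h8 : t.length = 8) :
    PySem.List.slice (P ++ '_' :: t) none (some (-9)) = P := by
  rw [PySem.List.slice_to_neg_ofNat _ 9 (by omega)]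
  rw [show (P ++ '_' :: t).length - 9 = P.length from by simp [h8]]
  exact List.take_left

-- ===== VERDICT (by name: the statement is the Claim_ definition above) =====
theorem extract_channel_id_py_spec : Claim_equal_extract_channel_id_py := by
  intro cache_key _
  unfold Spec_extract_channel_id_py extract_channel_id_py extract_channel_id_py_alt
  by_cases hE : cache_key.toList = []
  · simp [hE]
  · have hE' : cache_key.toList.isEmpty = false := by simp [hE]
    simp only [hE', Bool.false_eq_true, if_false]
    have hfold : ∀ u : List Char,
        ((PySem.Chars.lower u).all fun c => PySem.Chars.isIn [c] "0123456789abcdef".toList)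
          = hexAll u := fun _ => rfl
    by_cases hin : '_' ∈ cache_key.toList
    · obtain ⟨P, t, hdec, hnt⟩ := exists_last_occ hin
      have hIn : PySem.Chars.isIn ['_'] cache_key.toList = true := by
        rw [PySem.Chars.isIn_iff_infix, singleton_infix_iff]; exact hin
      rw [hIn]
      simp only [Bool.not_true, Bool.false_eq_true, if_false]
      rw [splitOn_single, hdec, mySplit_append '_' t hnt P []]
      rw [PySem.List.pyGetD_neg_one_append_singleton]
      rw [PySem.List.slice_to_neg_one, List.dropLast_concat]
      rw [join_mySplit '_' P []]
      simp only [hfold]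
      rw [condB_eq P t hnt]
      by_cases h8 : t.length = 8
      · rw [takeB_eq P t h8]
        simp
      · rw [show ((t.length == 8) && hexAll t) = false from by simp [h8]]
        simp
    · have hIn : PySem.Chars.isIn ['_'] cache_key.toList = false := by
        rw [PySem.Chars.isIn_eq_false_iff, singleton_infix_iff]; exact hin
      rw [hIn]
      have hget : (PySem.List.pyGet? cache_key.toList (-9) == some '_') = false := by
        rw [beq_eq_false_iff_ne]
        intro heq
        exact hin (PySem.List.mem_of_pyGet?_eq_some _ heq)
      rw [hget]
      simp
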